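-- pv_equiv track=rewrite | github.com/tahamajs/AP_grader_agent | tools.py | extract_practice_requirements
-- ===== SOURCE A (Python) =====
-- def extract_practice_requirements(pdf_text: str) -> dict:
--     """Extracts specific grading requirements from practice description text."""
--     requirements = {
--         "objectives": [],
--         "constraints": [],
--         "required_features": [],
--         "grading_criteria": [],
--         "bonus_features": [],
--     }
--
--     # Simple keyword-based extraction (can be enhanced with NLP if needed)
--     lines = pdf_text.split("\n")
--
--     for line in lines:
--         line_lower = line.lower().strip()
--
--         # Extract objectives
--         if any(
--             keyword in line_lower
--             for keyword in ["objective", "goal", "purpose", "task"]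
--         ):
--             if len(line.strip()) > 10:  # Avoid very short lines
--                 requirements["objectives"].append(line.strip())
--
--         # Extract constraints
--         elif any(
--             keyword in line_lower
--             for keyword in [
--                 "constraint",
--                 "limitation",
--                 "restriction",
--                 "must not",
--                 "cannot",
--             ]
--         ):
--             if len(line.strip()) > 10:
--                 requirements["constraints"].append(line.strip())
--
--         # Extract required features
--         elif any(
--             keyword in line_lower
--             for keyword in ["required", "implement", "create", "write"]
--         ):
--             if len(line.strip()) > 10:
--                 requirements["required_features"].append(line.strip())
--
--         # Extract grading criteria
--         elif any(
--             keyword in line_lower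
--             for keyword in ["grade", "point", "score", "criteria", "evaluation"]
--         ):
--             if len(line.strip()) > 10:
--                 requirements["grading_criteria"].append(line.strip())
--
--         # Extract bonus features
--         elif any(
--             keyword in line_lower
--             for keyword in ["bonus", "extra", "additional", "optional"]
--         ):
--             if len(line.strip()) > 10:
--                 requirements["bonus_features"].append(line.strip())
--
--     return requirements
-- ===== SOURCE B (Python) =====
-- CATEGORIES = [
--     ("objectives", ["objective", "goal", "purpose", "task"]),
--     ("constraints", ["constraint", "limitation", "restriction", "must not", "cannot"]),
--     ("required_features", ["required", "implement", "create", "write"]),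
--     ("grading_criteria", ["grade", "point", "score", "criteria", "evaluation"]),
--     ("bonus_features", ["bonus", "extra", "additional", "optional"]),
-- ]
--
--
-- def extract_practice_requirements(pdf_text: str) -> dict:
--     """Staged extraction: one independent filtering pass per category over
--     pre-stripped lines; a line belongs to a category iff it matches that
--     category's keywords and none of the keywords of the categories before it."""
--     lines = [(ln.strip(), ln.lower().strip()) for ln in pdf_text.split("\n")]
--     result = {}
--     earlier = []
--     for key, kws in CATEGORIES:
--         result[key] = [
--             s
--             for s, low in lines
--             if len(s) > 10
--             and any(kw in low for kw in kws)
--             and not any(kw in low for kw in earlier)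
--         ]
--         earlier = earlier + kws
--     return result
-- ===== Notes on version B (the rewrite author's own statement) =====
-- stated objective: alternative
-- what changed: Instead of A's single line-major pass that classifies each line through a five-way if/elif chain, B makes five independent category-major filtering passes over pre-stripped lines, selecting for each category the lines that match its keywords but none of the keywords of earlier categories.
import Mathlib
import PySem

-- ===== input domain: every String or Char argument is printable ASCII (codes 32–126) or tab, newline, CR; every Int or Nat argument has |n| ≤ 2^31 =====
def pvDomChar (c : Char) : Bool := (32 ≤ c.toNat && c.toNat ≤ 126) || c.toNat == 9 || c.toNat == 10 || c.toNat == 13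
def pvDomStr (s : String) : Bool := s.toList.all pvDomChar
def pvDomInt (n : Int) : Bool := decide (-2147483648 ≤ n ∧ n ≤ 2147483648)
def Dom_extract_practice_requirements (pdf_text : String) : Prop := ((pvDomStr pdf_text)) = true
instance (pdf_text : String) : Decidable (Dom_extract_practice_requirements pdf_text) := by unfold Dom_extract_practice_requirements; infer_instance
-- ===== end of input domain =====

-- B replaces A's single line-major pass with a five-way if/elif chain by five independent
-- category-major filtering passes over the pre-stripped lines (objective: alternative decomposition).


-- ===== PORT A =====
-- A's per-line if/elif body, as a named step function of its foldl
def pvStepA (req : PySem.Dict String (List String)) (line : String) :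
    PySem.Dict String (List String) :=
  let line_lower := PySem.Str.strip (PySem.Str.lower line)
  if ["objective", "goal", "purpose", "task"].any
      (fun kw => PySem.Str.isIn kw line_lower) then
    if PySem.Str.len (PySem.Str.strip line) > 10 then
      req.modify "objectives" [] (fun l => l ++ [PySem.Str.strip line])
    else req
  else if ["constraint", "limitation", "restriction", "must not", "cannot"].any
      (fun kw => PySem.Str.isIn kw line_lower) then
    if PySem.Str.len (PySem.Str.strip line) > 10 then
      req.modify "constraints" [] (fun l => l ++ [PySem.Str.strip line])
    else req
  else if ["required", "implement", "create", "write"].any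
      (fun kw => PySem.Str.isIn kw line_lower) then
    if PySem.Str.len (PySem.Str.strip line) > 10 then
      req.modify "required_features" [] (fun l => l ++ [PySem.Str.strip line])
    else req
  else if ["grade", "point", "score", "criteria", "evaluation"].any
      (fun kw => PySem.Str.isIn kw line_lower) then
    if PySem.Str.len (PySem.Str.strip line) > 10 then
      req.modify "grading_criteria" [] (fun l => l ++ [PySem.Str.strip line])
    else req
  else if ["bonus", "extra", "additional", "optional"].any
      (fun kw => PySem.Str.isIn kw line_lower) then
    if PySem.Str.len (PySem.Str.strip line) > 10 then
      req.modify "bonus_features" [] (fun l => l ++ [PySem.Str.strip line])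
    else req
  else req

def extract_practice_requirements (pdf_text : String) : List (String × List String) :=
  (((PySem.Str.split? pdf_text "\n").getD []).foldl pvStepA
    (((((PySem.Dict.empty.insert "objectives" []).insert "constraints" []).insert
        "required_features" []).insert "grading_criteria" []).insert "bonus_features" [])).items

-- ===== PORT B =====
-- Source B's CATEGORIES table
def pvCategories : List (String × List String) :=
  [("objectives", ["objective", "goal", "purpose", "task"]),
   ("constraints", ["constraint", "limitation", "restriction", "must not", "cannot"]),
   ("required_features", ["required", "implement", "create", "write"]),
   ("grading_criteria", ["grade", "point", "score", "criteria", "evaluation"]),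
   ("bonus_features", ["bonus", "extra", "additional", "optional"])]

-- Source B's 'for key, kws in CATEGORIES' loop: one comprehension (filterMap) per category,
-- carrying the flat list 'earlier' of all keywords of the categories already handled
def pvBuckets (tbl : List (String × List String)) (earlier : List String)
    (lines : List (String × String)) : List (String × List String) :=
  match tbl with
  | [] => []
  | (key, kws) :: rest =>
      (key, lines.filterMap (fun p =>
          if PySem.Str.len p.1 > 10 ∧
             (kws.any fun kw => PySem.Str.isIn kw p.2) ∧
             ¬ (earlier.any fun kw => PySem.Str.isIn kw p.2) then some p.1 else none))
        :: pvBuckets rest (earlier ++ kws) lines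

def extract_practice_requirements_alt (pdf_text : String) : List (String × List String) :=
  pvBuckets pvCategories []
    (((PySem.Str.split? pdf_text "\n").getD []).map
      (fun ln => (PySem.Str.strip ln, PySem.Str.strip (PySem.Str.lower ln))))

-- ===== PRECONDITION & SPEC =====
def Spec_extract_practice_requirements (pdf_text : String) (out : List (String × List String)) : Prop := out = extract_practice_requirements_alt pdf_text
instance (pdf_text : String) (out : List (String × List String)) : Decidable (Spec_extract_practice_requirements pdf_text out) := by unfold Spec_extract_practice_requirements; infer_instance

-- ===== CLAIM =====
def Claim_equal_extract_practice_requirements : Prop := ∀ (pdf_text : String), Dom_extract_practice_requirements pdf_text → Spec_extract_practice_requirements pdf_text (extract_practice_requirements pdf_text)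

-- ===== LEMMAS AND PROOFS =====
-- the five keyword groups and the flat 'earlier' prefixes
def pvK0 : List String := ["objective", "goal", "purpose", "task"]
def pvK1 : List String := ["constraint", "limitation", "restriction", "must not", "cannot"]
def pvK2 : List String := ["required", "implement", "create", "write"]
def pvK3 : List String := ["grade", "point", "score", "criteria", "evaluation"]
def pvK4 : List String := ["bonus", "extra", "additional", "optional"]

-- B's per-category selection, phrased on the raw line
def pvSel (kws earlier : List String) (lines : List String) : List String :=
  lines.filterMap (fun ln =>
    if PySem.Str.len (PySem.Str.strip ln) > 10 ∧
       (kws.any fun kw => PySem.Str.isIn kw (PySem.Str.strip (PySem.Str.lower ln))) ∧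
       ¬ (earlier.any fun kw => PySem.Str.isIn kw (PySem.Str.strip (PySem.Str.lower ln)))
    then some (PySem.Str.strip ln) else none)

def pvDict5 (a0 a1 a2 a3 a4 : List String) : PySem.Dict String (List String) :=
  PySem.Dict.mk [("objectives", a0), ("constraints", a1), ("required_features", a2),
                 ("grading_criteria", a3), ("bonus_features", a4)]

-- pointwise effect of Dict.modify on the concrete 5-key dict (kernel-reducible)
theorem pvMod0 (a0 a1 a2 a3 a4 : List String) (s : String) :
    (pvDict5 a0 a1 a2 a3 a4).modify "objectives" [] (fun l => l ++ [s]) =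
    pvDict5 (a0 ++ [s]) a1 a2 a3 a4 := rfl
theorem pvMod1 (a0 a1 a2 a3 a4 : List String) (s : String) :
    (pvDict5 a0 a1 a2 a3 a4).modify "constraints" [] (fun l => l ++ [s]) =
    pvDict5 a0 (a1 ++ [s]) a2 a3 a4 := rfl
theorem pvMod2 (a0 a1 a2 a3 a4 : List String) (s : String) :
    (pvDict5 a0 a1 a2 a3 a4).modify "required_features" [] (fun l => l ++ [s]) =
    pvDict5 a0 a1 (a2 ++ [s]) a3 a4 := rfl
theorem pvMod3 (a0 a1 a2 a3 a4 : List String) (s : String) :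
    (pvDict5 a0 a1 a2 a3 a4).modify "grading_criteria" [] (fun l => l ++ [s]) =
    pvDict5 a0 a1 a2 (a3 ++ [s]) a4 := rfl
theorem pvMod4 (a0 a1 a2 a3 a4 : List String) (s : String) :
    (pvDict5 a0 a1 a2 a3 a4).modify "bonus_features" [] (fun l => l ++ [s]) =
    pvDict5 a0 a1 a2 a3 (a4 ++ [s]) := rfl

-- pvSel on a single line is an if
theorem pvSel_single (kws earlier : List String) (ln : String) :
    pvSel kws earlier [ln] =
    (if PySem.Str.len (PySem.Str.strip ln) > 10 ∧
        (kws.any fun kw => PySem.Str.isIn kw (PySem.Str.strip (PySem.Str.lower ln))) ∧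
        ¬ (earlier.any fun kw => PySem.Str.isIn kw (PySem.Str.strip (PySem.Str.lower ln)))
     then [PySem.Str.strip ln] else []) := by
  unfold pvSel
  rw [List.filterMap_cons, List.filterMap_nil]
  by_cases hc : PySem.Str.len (PySem.Str.strip ln) > 10 ∧
        (kws.any fun kw => PySem.Str.isIn kw (PySem.Str.strip (PySem.Str.lower ln))) = true ∧
        ¬ (earlier.any fun kw => PySem.Str.isIn kw (PySem.Str.strip (PySem.Str.lower ln))) = true
  · rw [if_pos hc, if_pos hc]
  · rw [if_neg hc, if_neg hc]

-- abstract form of A's per-line step vs B's per-category conditions, over opaque bools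
theorem pvStepAbs (a0 a1 a2 a3 a4 : List String) (s : String) (L : Prop) [Decidable L]
    (m0 m1 m2 m3 m4 : Bool) :
    (if m0 = true then
       (if L then (pvDict5 a0 a1 a2 a3 a4).modify "objectives" [] (fun l => l ++ [s])
        else pvDict5 a0 a1 a2 a3 a4)
     else if m1 = true then
       (if L then (pvDict5 a0 a1 a2 a3 a4).modify "constraints" [] (fun l => l ++ [s])
        else pvDict5 a0 a1 a2 a3 a4)
     else if m2 = true then
       (if L then (pvDict5 a0 a1 a2 a3 a4).modify "required_features" [] (fun l => l ++ [s])
        else pvDict5 a0 a1 a2 a3 a4)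
     else if m3 = true then
       (if L then (pvDict5 a0 a1 a2 a3 a4).modify "grading_criteria" [] (fun l => l ++ [s])
        else pvDict5 a0 a1 a2 a3 a4)
     else if m4 = true then
       (if L then (pvDict5 a0 a1 a2 a3 a4).modify "bonus_features" [] (fun l => l ++ [s])
        else pvDict5 a0 a1 a2 a3 a4)
     else pvDict5 a0 a1 a2 a3 a4) =
    pvDict5 (a0 ++ if L ∧ m0 = true ∧ ¬ (false = true) then [s] else [])
      (a1 ++ if L ∧ m1 = true ∧ ¬ (m0 = true) then [s] else [])
      (a2 ++ if L ∧ m2 = true ∧ ¬ ((m0 || m1) = true) then [s] else [])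
      (a3 ++ if L ∧ m3 = true ∧ ¬ ((m0 || m1 || m2) = true) then [s] else [])
      (a4 ++ if L ∧ m4 = true ∧ ¬ ((m0 || m1 || m2 || m3) = true) then [s] else []) := by
  cases m0 <;> cases m1 <;> cases m2 <;> cases m3 <;> cases m4 <;>
    by_cases h : L <;>
    simp [h, pvMod0, pvMod1, pvMod2, pvMod3, pvMod4]

-- A's step on the 5-key dict grows exactly the bucket B's conditions select
set_option maxHeartbeats 2000000 in
theorem pvStepA_dict5 (a0 a1 a2 a3 a4 : List String) (ln : String) :
    pvStepA (pvDict5 a0 a1 a2 a3 a4) ln =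
    pvDict5 (a0 ++ pvSel pvK0 [] [ln]) (a1 ++ pvSel pvK1 pvK0 [ln])
      (a2 ++ pvSel pvK2 (pvK0 ++ pvK1) [ln]) (a3 ++ pvSel pvK3 (pvK0 ++ pvK1 ++ pvK2) [ln])
      (a4 ++ pvSel pvK4 (pvK0 ++ pvK1 ++ pvK2 ++ pvK3) [ln]) := by
  rw [pvSel_single, pvSel_single, pvSel_single, pvSel_single, pvSel_single]
  simp only [List.any_append, List.any_nil]
  exact pvStepAbs a0 a1 a2 a3 a4 (PySem.Str.strip ln)
    (PySem.Str.len (PySem.Str.strip ln) > 10)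
    (pvK0.any fun kw => PySem.Str.isIn kw (PySem.Str.strip (PySem.Str.lower ln)))
    (pvK1.any fun kw => PySem.Str.isIn kw (PySem.Str.strip (PySem.Str.lower ln)))
    (pvK2.any fun kw => PySem.Str.isIn kw (PySem.Str.strip (PySem.Str.lower ln)))
    (pvK3.any fun kw => PySem.Str.isIn kw (PySem.Str.strip (PySem.Str.lower ln)))
    (pvK4.any fun kw => PySem.Str.isIn kw (PySem.Str.strip (PySem.Str.lower ln)))

-- the whole fold of A, with generalized accumulators
theorem pvFoldA (lines : List String) : ∀ (a0 a1 a2 a3 a4 : List String),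
    lines.foldl pvStepA (pvDict5 a0 a1 a2 a3 a4) =
    pvDict5 (a0 ++ pvSel pvK0 [] lines) (a1 ++ pvSel pvK1 pvK0 lines)
      (a2 ++ pvSel pvK2 (pvK0 ++ pvK1) lines) (a3 ++ pvSel pvK3 (pvK0 ++ pvK1 ++ pvK2) lines)
      (a4 ++ pvSel pvK4 (pvK0 ++ pvK1 ++ pvK2 ++ pvK3) lines) := by
  induction lines with
  | nil => intro a0 a1 a2 a3 a4; simp [pvSel]
  | cons ln rest ih =>
    intro a0 a1 a2 a3 a4
    have hsel : ∀ kws earlier, pvSel kws earlier (ln :: rest) =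
        pvSel kws earlier [ln] ++ pvSel kws earlier rest := by
      intro kws earlier; simp [pvSel, List.filterMap_cons]; split <;> simp
    simp only [List.foldl_cons, pvStepA_dict5, ih, hsel, List.append_assoc]

-- B's buckets over the mapped line pairs are exactly the pvSel's over the raw lines
set_option maxHeartbeats 4000000 in
theorem pvBuckets_eq (lines : List String) :
    pvBuckets pvCategories []
      (lines.map fun ln => (PySem.Str.strip ln, PySem.Str.strip (PySem.Str.lower ln))) =
    [("objectives", pvSel pvK0 [] lines), ("constraints", pvSel pvK1 pvK0 lines),
     ("required_features", pvSel pvK2 (pvK0 ++ pvK1) lines),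
     ("grading_criteria", pvSel pvK3 (pvK0 ++ pvK1 ++ pvK2) lines),
     ("bonus_features", pvSel pvK4 (pvK0 ++ pvK1 ++ pvK2 ++ pvK3) lines)] := by
  simp only [pvBuckets, pvCategories, List.filterMap_map]
  rfl

-- ===== VERDICT =====
set_option maxHeartbeats 2000000 in
theorem extract_practice_requirements_spec : Claim_equal_extract_practice_requirements := by
  intro pdf_text _
  show extract_practice_requirements pdf_text = extract_practice_requirements_alt pdf_text
  unfold extract_practice_requirements extract_practice_requirements_alt
  rw [show (((((PySem.Dict.empty.insert "objectives" ([] : List String)).insert "constraints" []).insert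
        "required_features" []).insert "grading_criteria" []).insert "bonus_features" [])
      = pvDict5 [] [] [] [] [] from rfl,
    pvFoldA, pvBuckets_eq]
  rfl
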